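-- pv_equiv track=rewrite | github.com/Fahad8389/silent-hunter-v6 | pipeline/07_verification.py | classify_protein
-- ===== SOURCE A (Python) =====
-- from collections import Counter, defaultdict
--
-- def classify_protein(seq):
--     """TEST 4: Classify protein as likely real or possibly artifact."""
--     issues = []
--
--     # Check for repetitive sequences
--     for aa in 'AGLPQRS':
--         if aa * 5 in seq:
--             issues.append('repetitive')
--             break
--
--     # Check hydrophobicity
--     hydrophobic = sum(1 for a in seq if a in 'AILMFWV')
--     if hydrophobic / len(seq) > 0.6:
--         issues.append('too_hydrophobic')
--
--     # Check charge
--     charged = sum(1 for a in seq if a in 'DEKR')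
--     if charged / len(seq) > 0.4:
--         issues.append('too_charged')
--
--     # Check for low complexity (single AA > 30%)
--     counts = Counter(seq)
--     max_freq = max(counts.values()) / len(seq)
--     if max_freq > 0.3:
--         issues.append('low_complexity')
--
--     return 'likely_real' if len(issues) == 0 else 'possibly_artifact', issues
-- ===== SOURCE B (Python) =====
-- def classify_protein(seq):
--     """Classify protein as likely real or possibly artifact.
--
--     Single pass over the sequence with an accumulator (run-length detector for
--     repetitive stretches, hydrophobic/charged tallies, a per-residue count table),
--     then integer threshold tests, instead of staged re-scans of the string.
--     """
--     hydro = 0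
--     charged = 0
--     counts = {}
--     prev = None
--     run = 0
--     repetitive = False
--     for a in seq:
--         if a == prev:
--             run += 1
--         else:
--             prev = a
--             run = 1
--         if run >= 5 and a in 'AGLPQRS':
--             repetitive = True
--         if a in 'AILMFWV':
--             hydro += 1
--         elif a in 'DEKR':
--             charged += 1
--         counts[a] = counts.get(a, 0) + 1
--     n = len(seq)
--     issues = []
--     if repetitive:
--         issues.append('repetitive')
--     if 5 * hydro > 3 * n:
--         issues.append('too_hydrophobic')
--     if 5 * charged > 2 * n:
--         issues.append('too_charged')
--     if 10 * max(counts.values(), default=0) > 3 * n: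
--         issues.append('low_complexity')
--     return ('likely_real' if not issues else 'possibly_artifact'), issues
-- ===== Notes on version B (the rewrite author's own statement) =====
-- stated objective: alternative
-- what changed: B makes one pass over the sequence with an accumulator (a run-length detector replacing A's seven 'aa*5 in seq' substring searches, hydrophobic/charged tallies, and a count table) and then applies exact integer threshold tests, instead of A's four staged scans of the string.
import Mathlib
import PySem

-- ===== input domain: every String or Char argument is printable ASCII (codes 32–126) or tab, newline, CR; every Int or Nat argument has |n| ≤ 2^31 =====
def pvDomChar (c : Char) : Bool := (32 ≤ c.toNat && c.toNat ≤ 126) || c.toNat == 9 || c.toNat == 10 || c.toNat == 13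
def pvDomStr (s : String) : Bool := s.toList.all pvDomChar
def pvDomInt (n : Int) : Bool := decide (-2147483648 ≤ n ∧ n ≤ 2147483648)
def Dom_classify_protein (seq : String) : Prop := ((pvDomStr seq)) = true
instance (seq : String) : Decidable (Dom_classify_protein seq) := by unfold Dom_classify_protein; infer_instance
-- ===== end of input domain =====

-- B replaces A's four staged scans (seven substring searches, two membership scans, a Counter pass) by a
-- single pass with an accumulator: a run-length detector for the repetitive check plus running tallies and a
-- count table, followed by integer threshold tests; objective: alternative (same O(n) cost).
-- Float note: A compares hydro/len, charged/len, max_freq with the literals 0.6 / 0.4 / 0.3; for lengths up to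
-- 2^31 the rational gap to each threshold is far above double rounding error, so the comparisons are exactly
-- the rational ones 5h > 3n, 5c > 2n, 10m > 3n — both ports use these integer forms.

-- ===== PORT A =====
-- A-side helper: the 'for aa in "AGLPQRS": if aa*5 in seq: issues.append("repetitive"); break' loop
def pvRepLoopA (s : List Char) : List Char → List String → List String
  | [], issues => issues
  | aa :: rest, issues =>
      if PySem.Chars.isIn (PySem.List.pyRepeat [aa] 5) s then issues ++ ["repetitive"]
      else pvRepLoopA s rest issues

def classify_protein (seq : String) : String × List String :=
  let s := seq.toList
  let issues : List String := []
  let issues := pvRepLoopA s "AGLPQRS".toList issues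
  -- 'a in "AILMFWV"' with a a single character is character membership — exact
  let hydrophobic : Int := s.foldl (fun acc a => if "AILMFWV".toList.contains a then acc + 1 else acc) 0
  let n : Int := (PySem.Str.len seq : Int)
  -- hydrophobic / len(seq) > 0.6, exact as 5*h > 3*n (see float note above); len 0 raises in Python: Pre_ excludes it
  let issues := if 5 * hydrophobic > 3 * n then issues ++ ["too_hydrophobic"] else issues
  let charged : Int := s.foldl (fun acc a => if "DEKR".toList.contains a then acc + 1 else acc) 0
  let issues := if 5 * charged > 2 * n then issues ++ ["too_charged"] else issues
  let counts := PySem.Dict.counter s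
  -- max(counts.values()): only empty on seq = "", already excluded by Pre_ (ZeroDivisionError above); .getD 0 unreachable there
  let maxv : Int := (PySem.List.max? counts.values (fun x => x)).getD 0
  let issues := if 10 * maxv > 3 * n then issues ++ ["low_complexity"] else issues
  (if issues.length = 0 then "likely_real" else "possibly_artifact", issues)

-- ===== PORT B =====
-- B's loop state: one record holding Source B's accumulator variables hydro, charged, counts, prev, run, repetitive
structure PvSt where
  hydro : Int
  charged : Int
  counts : PySem.Dict Char Int
  prev : Option Char
  run : Nat
  rep : Bool

-- one iteration of Source B's 'for a in seq' body
def pvStepB (st : PvSt) (a : Char) : PvSt :=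
  let pr : Option Char × Nat :=
    if some a == st.prev then (st.prev, st.run + 1) else (some a, 1)
  let rep : Bool :=
    if 5 ≤ pr.2 ∧ "AGLPQRS".toList.contains a = true then true else st.rep
  let hc : Int × Int :=
    if "AILMFWV".toList.contains a then (st.hydro + 1, st.charged)
    else if "DEKR".toList.contains a then (st.hydro, st.charged + 1)
    else (st.hydro, st.charged)
  { hydro := hc.1, charged := hc.2,
    counts := st.counts.insert a (st.counts.getD a 0 + 1),
    prev := pr.1, run := pr.2, rep := rep }

def classify_protein_alt (seq : String) : String × List String :=
  let s := seq.toList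
  let st := s.foldl pvStepB ⟨0, 0, PySem.Dict.empty, none, 0, false⟩
  let n : Int := (PySem.Str.len seq : Int)
  let issues : List String := []
  let issues := if st.rep then issues ++ ["repetitive"] else issues
  let issues := if 5 * st.hydro > 3 * n then issues ++ ["too_hydrophobic"] else issues
  let issues := if 5 * st.charged > 2 * n then issues ++ ["too_charged"] else issues
  -- max(counts.values(), default=0)
  let issues := if 10 * PySem.List.maxD st.counts.values (fun x => x) 0 > 3 * n then issues ++ ["low_complexity"] else issues
  (if issues.isEmpty then "likely_real" else "possibly_artifact", issues)

-- ===== PRECONDITION & SPEC =====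
-- Pre_ excludes only the empty string, on which A raises ZeroDivisionError (hydrophobic / len(seq)).
def Pre_classify_protein (seq : String) : Prop := seq ≠ ""
instance (seq : String) : Decidable (Pre_classify_protein seq) := by unfold Pre_classify_protein; infer_instance
def pvWitness_classify_protein : String := "MKAD"

def Spec_classify_protein (seq : String) (out : String × List String) : Prop := out = classify_protein_alt seq
instance (seq : String) (out : String × List String) : Decidable (Spec_classify_protein seq out) := by unfold Spec_classify_protein; infer_instance

-- ===== CLAIM (what is proved, stated in full; the proofs are below) =====
def Claim_equal_classify_protein : Prop := ∀ (seq : String), Dom_classify_protein seq → Pre_classify_protein seq → Spec_classify_protein seq (classify_protein seq)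
-- ===== LEMMAS AND PROOFS =====

-- A's repetitive-check loop (append once, then break) equals an 'any' test
lemma pvRepLoopA_eq (s : List Char) (cs : List Char) (issues : List String) :
    pvRepLoopA s cs issues =
      if cs.any (fun aa => PySem.Chars.isIn (PySem.List.pyRepeat [aa] 5) s)
      then issues ++ ["repetitive"] else issues := by
  induction cs with
  | nil => simp [pvRepLoopA]
  | cons aa rest ih =>
      simp only [pvRepLoopA, List.any_cons, ih]
      by_cases h : PySem.Chars.isIn (PySem.List.pyRepeat [aa] 5) s = true <;> simp_all

-- the hydrophobic and charged alphabets are disjoint (so Source B's elif never misses a charged residue)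
lemma pv_disj (a : Char) (h : "AILMFWV".toList.contains a = true) : "DEKR".toList.contains a = false := by
  have e : "AILMFWV".toList = ['A','I','L','M','F','W','V'] := rfl
  rw [e] at h
  simp only [List.contains_cons, List.contains_nil, Bool.or_eq_true, beq_iff_eq] at h
  rcases h with h|h|h|h|h|h|h|h <;> first | (subst h; decide) | simp at h

-- projections of B's single fold onto the independent accumulators
lemma foldl_hydro (s : List Char) (st : PvSt) :
    (s.foldl pvStepB st).hydro
      = s.foldl (fun acc a => if "AILMFWV".toList.contains a then acc + 1 else acc) st.hydro := by
  induction s generalizing st with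
  | nil => rfl
  | cons a t ih =>
      simp only [List.foldl_cons]; rw [ih]; congr 1
      simp only [pvStepB]
      by_cases h1 : "AILMFWV".toList.contains a = true
      · simp only [if_pos h1]
      · simp only [if_neg h1]
        by_cases h2 : "DEKR".toList.contains a = true
        · simp only [if_pos h2]
        · simp only [if_neg h2]

lemma foldl_charged (s : List Char) (st : PvSt) :
    (s.foldl pvStepB st).charged
      = s.foldl (fun acc a => if "DEKR".toList.contains a then acc + 1 else acc) st.charged := by
  induction s generalizing st with
  | nil => rfl
  | cons a t ih =>
      simp only [List.foldl_cons]; rw [ih]; congr 1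
      simp only [pvStepB]
      by_cases h1 : "AILMFWV".toList.contains a = true
      · have hD : "DEKR".toList.contains a = false := pv_disj a h1
        simp only [if_pos h1, hD, Bool.false_eq_true, if_false]
      · simp only [if_neg h1]
        by_cases h2 : "DEKR".toList.contains a = true
        · simp only [if_pos h2]
        · simp only [if_neg h2]

lemma foldl_counts (s : List Char) (st : PvSt) :
    (s.foldl pvStepB st).counts
      = s.foldl (fun d a => d.insert a (d.getD a 0 + 1)) st.counts := by
  induction s generalizing st with
  | nil => rfl
  | cons a t ih => simp only [List.foldl_cons]; rw [ih]; rfl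

-- the (prev, run, rep) components of B's fold form their own fold
def pvRunStep (pr : Option Char × Nat × Bool) (a : Char) : Option Char × Nat × Bool :=
  let p2 : Option Char × Nat := if some a == pr.1 then (pr.1, pr.2.1 + 1) else (some a, 1)
  (p2.1, p2.2, if 5 ≤ p2.2 ∧ "AGLPQRS".toList.contains a = true then true else pr.2.2)

lemma foldl_runrep (s : List Char) (st : PvSt) :
    ((s.foldl pvStepB st).prev, (s.foldl pvStepB st).run, (s.foldl pvStepB st).rep)
      = s.foldl pvRunStep (st.prev, st.run, st.rep) := by
  induction s generalizing st with
  | nil => rfl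
  | cons a t ih =>
      simp only [List.foldl_cons]; rw [ih]; rfl

-- length of the constant run at the head of a list
def pvHeadRun : List Char → Nat
  | [] => 0
  | c :: t => 1 + (t.takeWhile (fun x => x == c)).length

-- the repetitive predicate, as B detects it
def pvAnyB (p : List Char) : Bool :=
  "AGLPQRS".toList.any (fun aa => decide (List.replicate 5 aa <:+: p))

lemma pvHeadRun_cons (c : Char) (r : List Char) :
    pvHeadRun (c :: r) = if r.head? = some c then pvHeadRun r + 1 else 1 := by
  cases r with
  | nil => simp [pvHeadRun]
  | cons d t =>
      by_cases h : d = c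
      · subst h; simp [pvHeadRun]; omega
      · have hb : (d == c) = false := by simp [h]
        simp [pvHeadRun, h, hb]

lemma pvHeadRun_cons' (c : Char) (p : List Char) :
    pvHeadRun (c :: p.reverse) = if p.getLast? = some c then pvHeadRun p.reverse + 1 else 1 := by
  rw [pvHeadRun_cons, List.head?_reverse]

-- a replicate is a prefix iff the head run in that letter is long enough
lemma replicate_prefix_iff (k : Nat) (a : Char) (r : List Char) :
    List.replicate k a <+: r ↔ k ≤ (r.takeWhile (fun x => x == a)).length := by
  induction r generalizing k with
  | nil => cases k <;> simp [List.replicate]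
  | cons d t ih =>
      cases k with
      | zero => simp
      | succ k =>
          rw [List.replicate_succ]
          by_cases h : d = a
          · subst h
            simp only [List.cons_prefix_cons, List.takeWhile_cons, beq_self_eq_true, if_true,
              List.length_cons, true_and, ih]
            omega
          · have hb : (d == a) = false := by simp [h]
            have hb' : ¬ (a = d) := fun hh => h hh.symm
            simp [List.cons_prefix_cons, List.takeWhile_cons, hb, hb']

-- appending one character extends an infix run check by exactly the new tail run
lemma repl_infix_concat (a c : Char) (p : List Char) :
    List.replicate 5 a <:+: (p ++ [c]) ↔
      List.replicate 5 a <:+: p ∨ (a = c ∧ 5 ≤ pvHeadRun (c :: p.reverse)) := by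
  have hrev : ∀ (q : List Char), List.replicate 5 a <:+: q ↔ List.replicate 5 a <:+: q.reverse := by
    intro q
    rw [← List.reverse_infix, List.reverse_replicate]
  rw [hrev, List.reverse_append]
  simp only [List.reverse_singleton, List.singleton_append]
  rw [List.infix_cons_iff]
  have hpre : List.replicate 5 a <+: c :: p.reverse ↔ (a = c ∧ 5 ≤ pvHeadRun (c :: p.reverse)) := by
    rw [replicate_prefix_iff]
    by_cases h : a = c
    · subst h
      simp [List.takeWhile_cons, pvHeadRun]
      omega
    · have h' : ¬ c = a := fun hh => h hh.symm
      have hb : (c == a) = false := by simp [h']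
      simp [List.takeWhile_cons, hb, h]
  rw [hpre, ← hrev]
  tauto

-- a Bool.any over a fixed list respects a member-wise equality of predicates
lemma pv_any_congr (l : List Char) (f g : Char → Bool) (h : ∀ x ∈ l, f x = g x) :
    l.any f = l.any g := by
  induction l with
  | nil => rfl
  | cons x t ih =>
      simp only [List.any_cons, h x (by simp), ih (fun y hy => h y (by simp [hy]))]

-- B's repetitive flag after one more character, in terms of the new head run
lemma pvAnyB_concat (p : List Char) (c : Char) :
    pvAnyB (p ++ [c])
      = if 5 ≤ pvHeadRun (c :: p.reverse) ∧ "AGLPQRS".toList.contains c = true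
        then true else pvAnyB p := by
  by_cases h : 5 ≤ pvHeadRun (c :: p.reverse) ∧ "AGLPQRS".toList.contains c = true
  · rw [if_pos h]
    rcases h with ⟨hrun, hc⟩
    have hmem : c ∈ "AGLPQRS".toList := by simpa using hc
    refine List.any_eq_true.mpr ⟨c, hmem, ?_⟩
    exact decide_eq_true ((repl_infix_concat c c p).mpr (Or.inr ⟨rfl, hrun⟩))
  · rw [if_neg h]
    unfold pvAnyB
    apply pv_any_congr
    intro aa hm
    have : (List.replicate 5 aa <:+: p ++ [c]) ↔ (List.replicate 5 aa <:+: p) := by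
      rw [repl_infix_concat]
      constructor
      · rintro (h1 | ⟨rfl, h2⟩)
        · exact h1
        · exact absurd ⟨h2, by simpa using hm⟩ h
      · exact Or.inl
    exact decide_eq_decide.mpr this

-- full invariant of B's (prev, run, rep) fold
lemma runrep_inv (s : List Char) :
    s.foldl pvRunStep ((none : Option Char), 0, false)
      = (s.getLast?, pvHeadRun s.reverse, pvAnyB s) := by
  induction s using List.reverseRecOn with
  | nil =>
      have h0 : pvAnyB [] = false := by decide
      simp [pvHeadRun, h0]
  | append_singleton p c ih =>
      rw [List.foldl_append, List.foldl_cons, List.foldl_nil, ih]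
      rw [show (p ++ [c]).reverse = c :: p.reverse by simp,
          show (p ++ [c]).getLast? = some c from List.getLast?_concat,
          pvAnyB_concat, pvHeadRun_cons']
      simp only [pvRunStep]
      by_cases hh : p.getLast? = some c
      · simp only [hh, beq_self_eq_true, if_true, eq_self_iff_true]
      · have hb : (some c == p.getLast?) = false := by
          rw [beq_eq_false_iff_ne]
          exact fun hx => hh hx.symm
        simp only [hb, if_neg hh, Bool.false_eq_true, if_false]

-- A's substring test for one letter is B's replicate-infix test
lemma pv_isIn_eq (aa : Char) (s : List Char) :
    PySem.Chars.isIn (PySem.List.pyRepeat [aa] 5) s = decide (List.replicate 5 aa <:+: s) := by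
  have e : PySem.List.pyRepeat [aa] (5 : Int) = List.replicate 5 aa := by
    rw [PySem.List.pyRepeat_singleton, show Int.toNat 5 = 5 from rfl]
  rw [e]
  by_cases h : List.replicate 5 aa <:+: s
  · rw [(PySem.Chars.isIn_iff_infix _ _).mpr h, decide_eq_true h]
  · rw [(PySem.Chars.isIn_eq_false_iff _ _).mpr h, decide_eq_false h]

-- length-0 test = isEmpty
lemma pv_len_empty (l : List String) (x y : String) :
    (if l.length = 0 then x else y) = (if l.isEmpty then x else y) := by
  cases l <;> simp

-- ===== VERDICT (by name: the statement is the Claim_ definition above) =====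
theorem classify_protein_spec : Claim_equal_classify_protein := by
  intro seq _ _
  unfold Spec_classify_protein classify_protein classify_protein_alt
  have hF := foldl_runrep seq.toList ⟨0, 0, PySem.Dict.empty, none, 0, false⟩
  rw [runrep_inv] at hF
  have hrep : (seq.toList.foldl pvStepB ⟨0, 0, PySem.Dict.empty, none, 0, false⟩).rep
      = pvAnyB seq.toList := congrArg (fun t => t.2.2) hF
  have hhyd := foldl_hydro seq.toList ⟨0, 0, PySem.Dict.empty, none, 0, false⟩
  have hch := foldl_charged seq.toList ⟨0, 0, PySem.Dict.empty, none, 0, false⟩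
  have hcnt : (seq.toList.foldl pvStepB ⟨0, 0, PySem.Dict.empty, none, 0, false⟩).counts
      = PySem.Dict.counter seq.toList := by
    rw [foldl_counts]
    exact PySem.Dict.foldl_insert_getD_add_one_eq_counter seq.toList
  have hA : "AGLPQRS".toList.any (fun aa => PySem.Chars.isIn (PySem.List.pyRepeat [aa] 5) seq.toList)
      = pvAnyB seq.toList := by
    unfold pvAnyB
    exact pv_any_congr _ _ _ (fun aa _ => pv_isIn_eq aa seq.toList)
  simp only [pvRepLoopA_eq, hrep, hhyd, hch, hcnt, hA, PySem.List.maxD, pv_len_empty]
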